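-- pv_equiv track=rewrite | github.com/openweave/happy | happy/utils/IP.py | dropZeros
-- ===== SOURCE A (Python) =====
-- def dropZeros(addr):
--     prefix = []
--     for a in reversed(addr.split(":")):
--         if a == "0000" and prefix == []:
--             continue
--         prefix.append(a)
--
--     prefix.reverse()
--     return ":".join(prefix)
-- ===== SOURCE B (Python) =====
-- def dropZeros(addr):
--     parts = addr.split(":")
--     end = len(parts)
--     while end > 0 and parts[end - 1] == "0000":
--         end -= 1
--     return ":".join(parts[:end])
-- ===== Notes on version B (the rewrite author's own statement) =====
-- stated objective: simpler
-- what changed: B finds the cut index with a backward while-loop over the split parts and returns a forward slice joined, instead of A's reverse/conditional-append/reverse accumulator.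
import Mathlib
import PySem

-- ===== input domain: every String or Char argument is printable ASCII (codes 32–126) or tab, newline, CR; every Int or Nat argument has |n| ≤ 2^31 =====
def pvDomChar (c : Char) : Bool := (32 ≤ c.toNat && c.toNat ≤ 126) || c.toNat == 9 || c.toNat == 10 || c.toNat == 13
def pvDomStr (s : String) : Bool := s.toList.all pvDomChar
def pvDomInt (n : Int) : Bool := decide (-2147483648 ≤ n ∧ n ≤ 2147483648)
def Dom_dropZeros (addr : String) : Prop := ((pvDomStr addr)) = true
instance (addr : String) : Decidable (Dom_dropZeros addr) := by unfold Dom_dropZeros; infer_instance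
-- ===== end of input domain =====

-- B replaces A's reverse/conditional-append/reverse accumulator by finding a cut index
-- from the end and joining a forward slice (objective: simpler); same return value.

-- ===== PORT A =====
-- prefix accumulator of the loop: 'if a == "0000" and prefix == []: continue; prefix.append(a)'
def dropZerosStep (pre : List String) (a : String) : List String :=
  if a == "0000" && pre.isEmpty then pre else pre ++ [a]

def dropZeros (addr : String) : String :=
  let parts := (PySem.Str.split? addr ":").getD []  -- sep ":" ≠ "" so split? = some (exact)
  let pre := parts.reverse.foldl dropZerosStep []
  PySem.Str.join ":" pre.reverse

-- ===== PORT B =====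
-- the while-loop 'while end > 0 and parts[end-1] == "0000": end -= 1', recursion on end
def dzCut (parts : List String) : Nat → Nat
  | 0 => 0
  | e + 1 => if parts.getD e "" == "0000" then dzCut parts e else e + 1

def dropZeros_alt (addr : String) : String :=
  let parts := (PySem.Str.split? addr ":").getD []  -- sep ":" ≠ "" so split? = some (exact)
  PySem.Str.join ":" (parts.take (dzCut parts parts.length))

-- ===== PRECONDITION & SPEC =====
def Spec_dropZeros (addr : String) (out : String) : Prop := out = dropZeros_alt addr
instance (addr : String) (out : String) : Decidable (Spec_dropZeros addr out) := by unfold Spec_dropZeros; infer_instance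

-- ===== CLAIM (what is proved, stated in full; the proofs are below) =====
def Claim_equal_dropZeros : Prop := ∀ (addr : String), Dom_dropZeros addr → Spec_dropZeros addr (dropZeros addr)

-- ===== LEMMAS AND PROOFS =====

-- once the accumulator is nonempty, A's loop just appends everything
theorem foldl_step_ne_nil (l : List String) (pre : List String) (h : pre ≠ []) :
    l.foldl dropZerosStep pre = pre ++ l := by
  induction l generalizing pre with
  | nil => simp
  | cons a l ih =>
    have hstep : dropZerosStep pre a = pre ++ [a] := by
      unfold dropZerosStep
      simp [List.isEmpty_iff, h]
    simp only [List.foldl_cons, hstep]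
    rw [ih (pre ++ [a]) (by simp)]
    simp

-- A's loop from the empty accumulator drops the leading "0000" run
theorem foldl_step_nil (l : List String) :
    l.foldl dropZerosStep [] = l.dropWhile (fun a => a == "0000") := by
  induction l with
  | nil => rfl
  | cons a l ih =>
    by_cases ha : a = "0000"
    · subst ha
      have hstep : dropZerosStep [] "0000" = [] := by
        unfold dropZerosStep; simp
      simp only [List.foldl_cons, hstep, ih, List.dropWhile_cons]
      simp
    · have hstep : dropZerosStep [] a = [a] := by
        unfold dropZerosStep; simp [ha]
      simp only [List.foldl_cons, hstep, List.dropWhile_cons]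
      rw [foldl_step_ne_nil l [a] (by simp)]
      simp [ha]

theorem dzCut_le (parts : List String) (e : Nat) : dzCut parts e ≤ e := by
  induction e with
  | zero => simp [dzCut]
  | succ e ih =>
    unfold dzCut
    split
    · omega
    · omega

theorem dzCut_append (l : List String) (a : String) (e : Nat) (he : e ≤ l.length) :
    dzCut (l ++ [a]) e = dzCut l e := by
  induction e with
  | zero => rfl
  | succ e ih =>
    unfold dzCut
    rw [List.getD_append _ _ _ _ (by omega)]
    split
    · exact ih (by omega)
    · rfl

-- B's cut-and-take equals the reverse of A's dropWhile on the reverse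
theorem take_dzCut (l : List String) :
    l.take (dzCut l l.length) = (l.reverse.dropWhile (fun a => a == "0000")).reverse := by
  induction l using List.reverseRecOn with
  | nil => rfl
  | append_singleton l a ih =>
    have hlen : (l ++ [a]).length = l.length + 1 := by simp
    rw [hlen]
    unfold dzCut
    rw [List.getD_append_right _ _ _ _ (le_refl _)]
    simp only [Nat.sub_self, List.getD_cons_zero]
    by_cases ha : a = "0000"
    · have : (a == "0000") = true := by simp [ha]
      rw [if_pos this, dzCut_append l a l.length (le_refl _)]
      rw [List.take_append_of_le_length (dzCut_le l l.length)]
      rw [List.reverse_append]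
      simp only [List.reverse_singleton, List.singleton_append, List.dropWhile_cons, this]
      simpa using ih
    · have hb : (a == "0000") = false := by simp [ha]
      rw [if_neg (by simp [hb])]
      rw [List.take_of_length_le (by simp)]
      rw [List.reverse_append]
      simp [hb]

-- ===== VERDICT (by name: the statement is the Claim_ definition above) =====
theorem dropZeros_spec : Claim_equal_dropZeros := by
  intro addr _
  unfold Spec_dropZeros dropZeros dropZeros_alt
  simp only [foldl_step_nil, take_dzCut]
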